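-- pv_equiv track=rewrite | github.com/hojoungjang/programmers-code-exercises | 1-2-3-더하기-4/solution.py | solution
-- ===== SOURCE A (Python) =====
-- def solution(n):
--     if n < 4:
--         return n
--     memo = [1 for _ in range(n + 1)]
--     for i in range(2, n+1):
--         memo[i] += memo[i-2]
--     for i in range(3, n+1):
--         memo[i] += memo[i-3]
--     return memo[n]
-- ===== SOURCE B (Python) =====
-- def solution(n):
--     # closed form: for n >= 4 the DP value is the nearest integer to (n+3)**2/12
--     return n if n < 4 else ((n + 3) ** 2 + 6) // 12
-- ===== Notes on version B (the rewrite author's own statement) =====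
-- stated objective: faster
-- what changed: Replaced the two O(n) DP passes over an (n+1)-element list by a constant-time closed-form quadratic formula (nearest-integer rounding of a quadratic in n), proved equal to the DP value.
import Mathlib
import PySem

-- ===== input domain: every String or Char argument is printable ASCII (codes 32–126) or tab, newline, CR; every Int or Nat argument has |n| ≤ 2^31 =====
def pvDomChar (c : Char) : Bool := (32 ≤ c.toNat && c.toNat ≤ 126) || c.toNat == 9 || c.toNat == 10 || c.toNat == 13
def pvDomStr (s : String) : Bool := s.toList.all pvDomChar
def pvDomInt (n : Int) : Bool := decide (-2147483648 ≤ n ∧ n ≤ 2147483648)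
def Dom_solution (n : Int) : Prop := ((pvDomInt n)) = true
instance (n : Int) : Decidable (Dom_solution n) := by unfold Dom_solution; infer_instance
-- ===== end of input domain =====

-- B replaces A's two linear DP passes by a constant-time closed-form quadratic formula.

-- ===== PORT A =====
-- Python's memo is a mutable list (a dynamic array), ported as Array Int; every
-- index used below is provably in [0, n], where Array.setIfInBounds / Array.getD
-- are exact for Python's in-range memo[i] assignment / read.
def solution (n : Int) : Int :=
  if n < 4 then n
  else
    -- memo = [1 for _ in range(n + 1)]
    let memo0 : Array Int := (Array.range (n + 1).toNat).map (fun _ => 1)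
    -- for i in range(2, n+1): memo[i] += memo[i-2]
    let memo1 := (PySem.List.pyRange 2 (n + 1) 1).foldl
      (fun m i => m.setIfInBounds i.toNat (m.getD i.toNat 0 + m.getD (i - 2).toNat 0)) memo0
    -- for i in range(3, n+1): memo[i] += memo[i-3]
    let memo2 := (PySem.List.pyRange 3 (n + 1) 1).foldl
      (fun m i => m.setIfInBounds i.toNat (m.getD i.toNat 0 + m.getD (i - 3).toNat 0)) memo1
    memo2.getD n.toNat 0

-- ===== PORT B =====
def solution_alt (n : Int) : Int :=
  if n < 4 then n else PySem.Int.floordiv ((n + 3) ^ 2 + 6) 12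

-- ===== PRECONDITION & SPEC =====
def Spec_solution (n : Int) (out : Int) : Prop := out = solution_alt n
instance (n : Int) (out : Int) : Decidable (Spec_solution n out) := by unfold Spec_solution; infer_instance

-- ===== CLAIM (what is proved, stated in full; the proofs are below) =====
def Claim_equal_solution : Prop := ∀ (n : Int), Dom_solution n → Spec_solution n (solution n)

-- ===== LEMMAS AND PROOFS =====

-- value of A's memo after both passes, as a recurrence
def gAux : Nat → Nat
  | 0 => 1
  | 1 => 1
  | 2 => 2
  | (j + 3) => ((j + 3) / 2 + 1) + gAux j

theorem arr_set (l : List Int) (i : Nat) (v : Int) :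
    l.toArray.setIfInBounds i v = (l.set i v).toArray := by simp

theorem arr_getD (l : List Int) (i : Nat) (d : Int) :
    l.toArray.getD i d = l.getD i d := by
  simp [Array.getD_eq_getD_getElem?, List.getD_eq_getElem?_getD]

-- the Array fold of A's port is the image under toArray of the same fold on lists
theorem fold_bridge (c : Int) (steps : List Int) (l : List Int) :
    steps.foldl
      (fun (m : Array Int) i => m.setIfInBounds i.toNat (m.getD i.toNat 0 + m.getD (i - c).toNat 0))
      l.toArray
    = (steps.foldl
        (fun (m : List Int) i => m.set i.toNat (m.getD i.toNat 0 + m.getD (i - c).toNat 0))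
        l).toArray := by
  induction steps generalizing l with
  | nil => rfl
  | cons a t ih =>
    simp only [List.foldl_cons, arr_getD, arr_set]
    exact ih _

theorem set_map_range {f : Nat → Int} {L idx : Nat} (h : idx < L) (v : Int) :
    ((List.range L).map f).set idx v
      = (List.range L).map (fun j => if j = idx then v else f j) := by
  apply List.ext_getElem
  · simp
  · intro i h1 h2
    simp at h1
    simp only [List.getElem_set, List.getElem_map, List.getElem_range]
    by_cases hi : i = idx
    · simp [hi]
    · rw [if_neg (fun h' => hi h'.symm), if_neg hi]

theorem loop1_inv (L k : Nat) (hk : 2 + k ≤ L) :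
    (PySem.List.pyRange 2 (2 + (k : Int)) 1).foldl
      (fun (m : List Int) i => m.set i.toNat (m.getD i.toNat 0 + m.getD (i - 2).toNat 0))
      ((List.range L).map (fun _ => (1 : Int)))
    = (List.range L).map (fun j => if j < 2 + k then ((j / 2 + 1 : Nat) : Int) else 1) := by
  induction k with
  | zero =>
    rw [PySem.List.pyRange_one_eq_nil (by omega)]
    simp only [List.foldl_nil]
    apply List.map_congr_left
    intro j hj
    by_cases h : j < 2
    · interval_cases j <;> simp
    · simp [h]
  | succ k ih =>
    have h1 : (2 + (((k + 1 : Nat)) : Int)) = (2 + (k : Int)) + 1 := by push_cast; ring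
    rw [h1, PySem.List.pyRange_one_succ_right (by omega), List.foldl_append,
      ih (by omega)]
    simp only [List.foldl_cons, List.foldl_nil]
    have hidx2 : ((2 + (k : Int)) - 2).toNat = k := by omega
    have hidx : ((2 + (k : Int))).toNat = 2 + k := by omega
    rw [hidx2, hidx, List.getD_eq_getElem?_getD, List.getD_eq_getElem?_getD]
    rw [List.getElem?_map, List.getElem?_range (by omega : 2 + k < L),
      List.getElem?_map, List.getElem?_range (by omega : k < L)]
    simp only [Option.map_some, Option.getD_some]
    rw [set_map_range (by omega)]
    apply List.map_congr_left
    intro j hj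
    simp only [List.mem_range] at hj
    by_cases h2 : j = 2 + k
    · subst h2
      have hlt : ¬ (2 + k < 2 + k) := by omega
      simp only [hlt, if_false, if_pos (by omega : k < 2 + k),
        if_pos (by omega : 2 + k < 2 + (k + 1))]
      push_cast
      omega
    · by_cases h3 : j < 2 + k
      · simp [h2, h3, show j < 2 + (k + 1) by omega]
      · simp [h2, h3, show ¬ j < 2 + (k + 1) by omega]

theorem loop2_inv (L k : Nat) (hk : 3 + k ≤ L) :
    (PySem.List.pyRange 3 (3 + (k : Int)) 1).foldl
      (fun (m : List Int) i => m.set i.toNat (m.getD i.toNat 0 + m.getD (i - 3).toNat 0))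
      ((List.range L).map (fun j => ((j / 2 + 1 : Nat) : Int)))
    = (List.range L).map (fun j => if j < 3 + k then ((gAux j : Nat) : Int) else ((j / 2 + 1 : Nat) : Int)) := by
  induction k with
  | zero =>
    rw [PySem.List.pyRange_one_eq_nil (by omega)]
    simp only [List.foldl_nil]
    apply List.map_congr_left
    intro j hj
    by_cases h : j < 3
    · interval_cases j <;> simp [gAux]
    · simp [h]
  | succ k ih =>
    have h1 : (3 + (((k + 1 : Nat)) : Int)) = (3 + (k : Int)) + 1 := by push_cast; ring
    rw [h1, PySem.List.pyRange_one_succ_right (by omega), List.foldl_append,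
      ih (by omega)]
    simp only [List.foldl_cons, List.foldl_nil]
    have hidx2 : ((3 + (k : Int)) - 3).toNat = k := by omega
    have hidx : ((3 + (k : Int))).toNat = 3 + k := by omega
    rw [hidx2, hidx, List.getD_eq_getElem?_getD, List.getD_eq_getElem?_getD]
    rw [List.getElem?_map, List.getElem?_range (by omega : 3 + k < L),
      List.getElem?_map, List.getElem?_range (by omega : k < L)]
    simp only [Option.map_some, Option.getD_some]
    rw [set_map_range (by omega)]
    apply List.map_congr_left
    intro j hj
    simp only [List.mem_range] at hj
    by_cases h2 : j = 3 + k
    · subst h2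
      have hlt : ¬ (3 + k < 3 + k) := by omega
      simp only [hlt, if_false, if_pos (by omega : k < 3 + k),
        if_pos (by omega : 3 + k < 3 + (k + 1))]
      have h3k : 3 + k = k + 3 := by omega
      rw [h3k, gAux]
      push_cast
      ring
    · by_cases h3 : j < 3 + k
      · simp [h2, h3, show j < 3 + (k + 1) by omega]
      · simp [h2, h3, show ¬ j < 3 + (k + 1) by omega]

theorem gAux_closed (j : Nat) : gAux j = ((j + 3) ^ 2 + 6) / 12 := by
  induction j using Nat.strong_induction_on with
  | _ j ih =>
    match j with
    | 0 => decide
    | 1 => decide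
    | 2 => decide
    | 3 => decide
    | 4 => decide
    | 5 => decide
    | (k + 6) =>
      have e1 : k + 6 = (k + 3) + 3 := by omega
      rw [e1, gAux, gAux, ih k (by omega)]
      have hsq2 : (k + 3 + 3 + 3) ^ 2 = (k + 3) ^ 2 + (12 * (k + 6)) := by ring
      rw [hsq2]
      generalize (k + 3) ^ 2 = s
      omega

theorem solution_eq_gAux (n : Int) (h : ¬ n < 4) :
    solution n = ((gAux n.toNat : Nat) : Int) := by
  unfold solution
  rw [if_neg h]
  have hL : (n + 1).toNat = n.toNat + 1 := by omega
  have h2 : (n + 1) = 2 + ((n.toNat - 1 : Nat) : Int) := by omega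
  have h3 : (n + 1) = 3 + ((n.toNat - 2 : Nat) : Int) := by omega
  have h0 : (Array.range (n.toNat + 1)).map (fun _ => (1 : Int))
      = ((List.range (n.toNat + 1)).map (fun _ => (1 : Int))).toArray := by
    apply Array.toList_inj.mp
    simp
  simp only [hL, h0, fold_bridge]
  have L1 := loop1_inv (n.toNat + 1) (n.toNat - 1) (by omega)
  rw [← h2] at L1
  rw [L1]
  have hcong : (List.range (n.toNat + 1)).map
      (fun j => if j < 2 + (n.toNat - 1) then ((j / 2 + 1 : Nat) : Int) else 1)
      = (List.range (n.toNat + 1)).map (fun j => ((j / 2 + 1 : Nat) : Int)) := by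
    apply List.map_congr_left
    intro j hj
    simp only [List.mem_range] at hj
    rw [if_pos (by omega)]
  rw [hcong]
  have L2 := loop2_inv (n.toNat + 1) (n.toNat - 2) (by omega)
  rw [← h3] at L2
  rw [L2]
  rw [arr_getD, List.getD_eq_getElem?_getD, List.getElem?_map,
    List.getElem?_range (by omega : n.toNat < n.toNat + 1)]
  simp only [Option.map_some, Option.getD_some]
  rw [if_pos (by omega)]

-- ===== VERDICT (by name: the statement is the Claim_ definition above) =====
theorem solution_spec : Claim_equal_solution := by
  intro n _
  unfold Spec_solution solution_alt
  by_cases h : n < 4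
  · unfold solution
    rw [if_pos h, if_pos h]
  · rw [if_neg h, solution_eq_gAux n h, gAux_closed]
    have hc : (n + 3) = ((n.toNat + 3 : Nat) : Int) := by omega
    rw [hc]
    have : (((n.toNat + 3 : Nat) : Int)) ^ 2 + 6 = (((n.toNat + 3) ^ 2 + 6 : Nat) : Int) := by
      push_cast; ring
    rw [this]
    exact_mod_cast (PySem.Int.floordiv_natCast _ 12).symm
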